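-- pv_equiv track=rewrite | github.com/smitches/Python | CS 313/htmlChecker.py | getTaglist
-- ===== SOURCE A (Python) =====
-- def getTaglist(htmlfile):
--     #empty taglist created
--     taglist=[]
--     add=False
--
--     #read through lines
--     for line in htmlfile:
--
--         #read through characters
--         for ch in line:
--
--             #see is character is beginning of tag
--             if ch=='<':
--                 add=True
--                 #begin string
--                 s=''
--
--             #find end of tag
--             elif (ch=='>' or ch==' ' or ch=='\n') and add==True:
--                 add=False
--                 #add to taglist
--                 taglist.append(s)
--
--             #determine name of tag
--             if add==True and ch!='<':
--                 s+=ch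
--
--     #return taglist
--     return taglist
-- ===== SOURCE B (Python) =====
-- def getTaglist(htmlfile):
--     # Single-pass index scanner over the joined text: no boolean flag state;
--     # the inner loop finds the delimiter that ends (or restarts) a tag.
--     text = ''.join(htmlfile)
--     taglist = []
--     i, n = 0, len(text)
--     while i < n:
--         if text[i] != '<':
--             i += 1
--             continue
--         j = i + 1
--         while j < n and text[j] not in '<> \n':
--             j += 1
--         if j == n:          # unterminated tag: dropped
--             break
--         if text[j] == '<':  # a '<' restarts the tag
--             i = j
--         else:               # '>', ' ' or '\n' terminates it
--             taglist.append(text[i+1:j])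
--             i = j + 1
--     return taglist
-- ===== Notes on version B (the rewrite author's own statement) =====
-- stated objective: simpler
-- what changed: Replaced A's per-line, per-character automaton with a boolean flag and a growing-name state by a flag-free index scanner over the joined text that jumps from each '<' to the next delimiter and slices out the tag name.
import Mathlib
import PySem

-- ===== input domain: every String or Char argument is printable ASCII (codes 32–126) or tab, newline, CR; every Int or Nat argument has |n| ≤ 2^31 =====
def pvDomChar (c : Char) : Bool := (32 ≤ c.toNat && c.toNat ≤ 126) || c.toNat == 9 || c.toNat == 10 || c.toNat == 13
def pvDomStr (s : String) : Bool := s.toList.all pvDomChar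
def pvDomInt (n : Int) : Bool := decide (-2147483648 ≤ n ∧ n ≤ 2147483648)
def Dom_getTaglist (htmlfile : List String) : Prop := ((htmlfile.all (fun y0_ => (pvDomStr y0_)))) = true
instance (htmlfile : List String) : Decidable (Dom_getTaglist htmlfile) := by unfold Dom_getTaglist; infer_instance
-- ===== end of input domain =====

-- B replaces A's per-character boolean-flag automaton by a flag-free scanner over the
-- joined text that jumps from '<' to the next delimiter (objective: simpler).

-- ===== PORT A =====
-- state = (taglist, add, s); s is kept as List Char (Python builds it with s += ch)
def pvStepA (st : List String × Bool × List Char) (ch : Char) :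
    List String × Bool × List Char :=
  let tl := st.1; let add := st.2.1; let s := st.2.2
  -- if ch=='<': add=True, s=''
  let st1 : List String × Bool × List Char :=
    if ch = '<' then (tl, true, [])
    -- elif (ch=='>' or ch==' ' or ch=='\n') and add: add=False; taglist.append(s)
    else if (ch = '>' ∨ ch = ' ' ∨ ch = '\n') ∧ add = true then
      (tl ++ [String.ofList s], false, s)
    else (tl, add, s)
  -- if add and ch!='<': s += ch
  if st1.2.1 = true ∧ ch ≠ '<' then (st1.1, st1.2.1, st1.2.2 ++ [ch]) else st1

def getTaglist (htmlfile : List String) : List String :=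
  (htmlfile.foldl (fun st line => line.toList.foldl pvStepA st) ([], false, [])).1

-- ===== PORT B =====
mutual
-- outer while loop of B: skip to the next '<'
def pvScanOut : List Char → List String
  | [] => []
  | c :: rest => if c = '<' then pvScanTag rest [] else pvScanOut rest
-- inner while loop of B: collect the tag name until a delimiter; '<' restarts,
-- '>'/' '/'\n' emits the slice text[i+1:j] (here: the collected acc), end of input drops it
def pvScanTag : List Char → List Char → List String
  | [], _ => []
  | c :: rest, acc =>
    if c = '<' then pvScanTag rest []
    else if c = '>' ∨ c = ' ' ∨ c = '\n' then String.ofList acc :: pvScanOut rest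
    else pvScanTag rest (acc ++ [c])
end

def getTaglist_alt (htmlfile : List String) : List String :=
  -- text = ''.join(htmlfile)
  pvScanOut (htmlfile.flatMap String.toList)

-- ===== PRECONDITION & SPEC =====
def Spec_getTaglist (htmlfile : List String) (out : List String) : Prop := out = getTaglist_alt htmlfile
instance (htmlfile : List String) (out : List String) : Decidable (Spec_getTaglist htmlfile out) := by unfold Spec_getTaglist; infer_instance

-- ===== CLAIM (what is proved, stated in full; the proofs are below) =====
def Claim_equal_getTaglist : Prop := ∀ (htmlfile : List String), Dom_getTaglist htmlfile → Spec_getTaglist htmlfile (getTaglist htmlfile)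

-- ===== LEMMAS AND PROOFS =====

-- A's nested fold over lines/chars equals one fold over the joined character stream
theorem foldA_flat (htmlfile : List String) (st : List String × Bool × List Char) :
    htmlfile.foldl (fun st line => line.toList.foldl pvStepA st) st
      = (htmlfile.flatMap String.toList).foldl pvStepA st := by
  induction htmlfile generalizing st with
  | nil => rfl
  | cons l ls ih => simp [List.flatMap_cons, List.foldl_append, ih]

-- joint loop invariant: A's automaton in state add=false behaves like pvScanOut,
-- in state add=true (with partial name s) like pvScanTag
theorem scan_inv (cs : List Char) :
    (∀ tl s, (cs.foldl pvStepA (tl, false, s)).1 = tl ++ pvScanOut cs) ∧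
    (∀ tl s, (cs.foldl pvStepA (tl, true, s)).1 = tl ++ pvScanTag cs s) := by
  induction cs with
  | nil => simp [pvScanOut, pvScanTag]
  | cons c rest ih =>
    constructor
    · intro tl s
      by_cases h : c = '<'
      · simp [h, pvStepA, pvScanOut, ih.2]
      · simp [h, pvStepA, pvScanOut, ih.1]
    · intro tl s
      by_cases h : c = '<'
      · simp [h, pvStepA, pvScanTag, ih.2]
      · by_cases h2 : c = '>' ∨ c = ' ' ∨ c = '\n'
        · simp [h, h2, pvStepA, pvScanTag, ih.1]
        · simp [h, h2, pvStepA, pvScanTag, ih.2]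

-- ===== VERDICT (by name: the statement is the Claim_ definition above) =====
theorem getTaglist_spec : Claim_equal_getTaglist := by
  intro htmlfile _
  show getTaglist htmlfile = getTaglist_alt htmlfile
  unfold getTaglist getTaglist_alt
  rw [foldA_flat]
  exact (scan_inv _).1 [] []
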